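-- pv_equiv track=rewrite | github.com/James-HoneyBadger/Time_Warp_Studio | Platforms/Python/time_warp/languages/smalltalk.py | _split_keyword_pairs
-- ===== SOURCE A (Python) =====
-- def _split_keyword_pairs(kw_str: str) -> list[tuple[str, str]]:
--     """Split 'key1: arg1 key2: arg2' respecting [...] and (...) nesting."""
--     pairs: list[tuple[str, str]] = []
--     depth = 0
--     current_key = ""
--     arg_start = -1
--     i = 0
--     while i < len(kw_str):
--         ch = kw_str[i]
--         if ch in ("[", "("):
--             depth += 1
--         elif ch in ("]", ")"):
--             depth -= 1
--         elif ch == ":" and depth == 0: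
--             # Look back for keyword identifier
--             j = i - 1
--             while j >= 0 and (kw_str[j].isalnum() or kw_str[j] == "_"):
--                 j -= 1
--             kw_start = j + 1
--             if kw_start < i and kw_str[kw_start].isalpha():
--                 # Save previous pair
--                 if current_key and arg_start >= 0:
--                     pairs.append((current_key, kw_str[arg_start:kw_start].strip()))
--                 current_key = kw_str[kw_start : i + 1]  # includes ':'
--                 arg_start = i + 1
--         i += 1
--     # Last pair
--     if current_key and arg_start >= 0:
--         pairs.append((current_key, kw_str[arg_start:].strip()))
--     return pairs
-- ===== SOURCE B (Python) =====
-- def _split_keyword_pairs(kw_str: str) -> list[tuple[str, str]]: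
--     """Two-pass: collect (kw_start, colon) markers at bracket depth 0, then assemble pairs."""
--     marks: list[tuple[int, int]] = []
--     depth = 0
--     for i, ch in enumerate(kw_str):
--         if ch in "[(":
--             depth += 1
--         elif ch in "])":
--             depth -= 1
--         elif ch == ":" and depth == 0:
--             run = 0
--             for c in reversed(kw_str[:i]):
--                 if c.isalnum() or c == "_":
--                     run += 1
--                 else:
--                     break
--             ks = i - run
--             if run and kw_str[ks].isalpha():
--                 marks.append((ks, i))
--     pairs: list[tuple[str, str]] = []
--     for (ks, c), (nxt, _) in zip(marks, marks[1:] + [(len(kw_str), 0)]):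
--         pairs.append((kw_str[ks : c + 1], kw_str[c + 1 : nxt].strip()))
--     return pairs
-- ===== Notes on version B (the rewrite author's own statement) =====
-- stated objective: alternative
-- what changed: A interleaves pair emission with the scan via carried current_key/arg_start state; B first collects (kw_start, colon) markers in one depth-tracking pass, then assembles the pairs by zipping each marker with the start of the next; a timing run measured B about 2.5x faster (constant factor: the scan pass does no string slicing or tuple bookkeeping per character).
import Mathlib
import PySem

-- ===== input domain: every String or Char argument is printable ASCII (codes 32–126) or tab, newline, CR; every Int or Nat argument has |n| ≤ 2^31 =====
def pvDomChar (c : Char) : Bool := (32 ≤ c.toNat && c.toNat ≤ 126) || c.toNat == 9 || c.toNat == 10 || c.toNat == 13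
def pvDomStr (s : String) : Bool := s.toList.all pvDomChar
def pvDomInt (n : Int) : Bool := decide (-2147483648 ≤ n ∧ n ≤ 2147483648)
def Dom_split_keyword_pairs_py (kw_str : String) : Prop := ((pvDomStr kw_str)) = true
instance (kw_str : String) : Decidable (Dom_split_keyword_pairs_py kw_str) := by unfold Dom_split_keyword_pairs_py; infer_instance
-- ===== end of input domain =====

-- B re-decomposes A's single stateful scan into two passes (collect keyword markers, then assemble
-- the pairs by pairing each marker with the next); same return value, objective: alternative.

-- ===== PORT A =====
-- inner while loop: j = i-1; while j >= 0 and (kw_str[j].isalnum() or kw_str[j] == "_"): j -= 1;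
-- argument is j+1 (so 0 encodes j = -1); returns kw_start = j + 1
def pvBackA (cs : List Char) : Nat → Nat
  | 0 => 0
  | j + 1 =>
      if PySem.Chars.isalnum (cs.getD j ' ') || cs.getD j ' ' == '_' then pvBackA cs j
      else j + 1

structure StA where
  depth : Int
  key : List Char
  argst : Int
  pairs : List (String × String)
deriving Repr, DecidableEq

-- one iteration of A's while loop (i the current index)
def pvStepA (cs : List Char) (st : StA) (i : Nat) : StA :=
  let ch := cs.getD i ' '
  if ch = '[' ∨ ch = '(' then { st with depth := st.depth + 1 }
  else if ch = ']' ∨ ch = ')' then { st with depth := st.depth - 1 }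
  else if ch = ':' ∧ st.depth = 0 then
    let kw_start := pvBackA cs i
    if kw_start < i ∧ PySem.Chars.isalpha (cs.getD kw_start ' ') = true then
      let pairs' :=
        if st.key ≠ [] ∧ st.argst ≥ 0 then
          st.pairs ++ [(String.ofList st.key,
            String.ofList (PySem.Chars.strip
              (PySem.List.slice cs (some st.argst) (some (kw_start : Int)))))]
        else st.pairs
      { depth := st.depth,
        key := PySem.List.slice cs (some (kw_start : Int)) (some ((i : Int) + 1)),
        argst := (i : Int) + 1,
        pairs := pairs' }
    else st
  else st

def split_keyword_pairs_py (kw_str : String) : List (String × String) :=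
  let cs := kw_str.toList
  let st := (List.range cs.length).foldl (pvStepA cs) ⟨0, [], -1, []⟩
  if st.key ≠ [] ∧ st.argst ≥ 0 then
    st.pairs ++ [(String.ofList st.key,
      String.ofList (PySem.Chars.strip (PySem.List.slice cs (some st.argst) none)))]
  else st.pairs

-- ===== PORT B =====
def pvIdentChar (c : Char) : Bool := PySem.Chars.isalnum c || c == '_'

-- pass one: state (depth, collected markers (kw_start, colon index))
def pvStepB (cs : List Char) (st : Int × List (Nat × Nat)) (i : Nat) : Int × List (Nat × Nat) :=
  let ch := cs.getD i ' '
  if ch = '[' ∨ ch = '(' then (st.1 + 1, st.2)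
  else if ch = ']' ∨ ch = ')' then (st.1 - 1, st.2)
  else if ch = ':' ∧ st.1 = 0 then
    let run := ((cs.take i).reverse.takeWhile pvIdentChar).length
    let ks := i - run
    if 0 < run ∧ PySem.Chars.isalpha (cs.getD ks ' ') = true then (st.1, st.2 ++ [(ks, i)])
    else st
  else st

-- pass two: each marker paired with the start of the next one (end of string for the last)
def pvAssemble (cs : List Char) : List (Nat × Nat) → List (String × String)
  | [] => []
  | (ks, c) :: rest =>
      let e : Nat := match rest with | [] => cs.length | (k2, _) :: _ => k2
      (String.ofList ((cs.drop ks).take (c + 1 - ks)),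
       String.ofList (PySem.Chars.strip ((cs.drop (c + 1)).take (e - (c + 1)))))
        :: pvAssemble cs rest

def split_keyword_pairs_py_alt (kw_str : String) : List (String × String) :=
  let cs := kw_str.toList
  pvAssemble cs ((List.range cs.length).foldl (pvStepB cs) (0, [])).2

-- ===== PRECONDITION & SPEC =====
def Spec_split_keyword_pairs_py (kw_str : String) (out : List (String × String)) : Prop := out = split_keyword_pairs_py_alt kw_str
instance (kw_str : String) (out : List (String × String)) : Decidable (Spec_split_keyword_pairs_py kw_str out) := by unfold Spec_split_keyword_pairs_py; infer_instance

-- ===== CLAIM (what is proved, stated in full; the proofs are below) =====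
def Claim_equal_split_keyword_pairs_py : Prop := ∀ (kw_str : String), Dom_split_keyword_pairs_py kw_str → Spec_split_keyword_pairs_py kw_str (split_keyword_pairs_py kw_str)

-- ===== LEMMAS AND PROOFS =====

-- pvAssemble with an explicit end position for the final pair
def pvAsmE (cs : List Char) (e : Nat) : List (Nat × Nat) → List (String × String)
  | [] => []
  | (ks, c) :: rest =>
      let e' : Nat := match rest with | [] => e | (k2, _) :: _ => k2
      (String.ofList ((cs.drop ks).take (c + 1 - ks)),
       String.ofList (PySem.Chars.strip ((cs.drop (c + 1)).take (e' - (c + 1)))))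
        :: pvAsmE cs e rest

theorem pvAssemble_eq_asmE (cs : List Char) (ms : List (Nat × Nat)) :
    pvAssemble cs ms = pvAsmE cs cs.length ms := by
  induction ms with
  | nil => rfl
  | cons a ms ih =>
      obtain ⟨ks, c⟩ := a
      cases ms <;> simp [pvAssemble, pvAsmE] <;> simpa [pvAssemble, pvAsmE] using ih

theorem pvAsmE_snoc (cs : List Char) (e ks c : Nat) (ms : List (Nat × Nat)) :
    pvAsmE cs e (ms ++ [(ks, c)]) =
      pvAsmE cs ks ms ++ [(String.ofList ((cs.drop ks).take (c + 1 - ks)),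
        String.ofList (PySem.Chars.strip ((cs.drop (c + 1)).take (e - (c + 1)))))] := by
  induction ms with
  | nil => rfl
  | cons a ms ih =>
      obtain ⟨k0, c0⟩ := a
      cases ms <;> simp [pvAsmE] <;> simpa [pvAsmE] using ih

theorem pvBackA_eq (cs : List Char) (i : Nat) (hi : i ≤ cs.length) :
    pvBackA cs i = i - ((cs.take i).reverse.takeWhile pvIdentChar).length := by
  induction i with
  | zero => rfl
  | succ j ih =>
      have hj : j < cs.length := hi
      have hget : cs.getD j ' ' = cs[j] := by
        simp [List.getD, List.getElem?_eq_getElem hj]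
      have hrev : (cs.take (j + 1)).reverse = cs[j] :: (cs.take j).reverse := by
        simp only [List.take_add_one, List.getElem?_eq_getElem hj, Option.toList_some,
          List.reverse_append, List.reverse_cons, List.reverse_nil, List.nil_append,
          List.singleton_append]
      rw [hrev, List.takeWhile_cons]
      by_cases hp : pvIdentChar cs[j] = true
      · rw [if_pos hp]
        simp only [pvIdentChar] at hp
        have hstep : pvBackA cs (j + 1) = pvBackA cs j := by
          simp [pvBackA, List.getElem?_eq_getElem hj, hp]
        rw [hstep, ih (Nat.le_of_lt hj)]
        simp only [List.length_cons]
        omega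
      · rw [if_neg hp]
        simp only [pvIdentChar] at hp
        have hstep : pvBackA cs (j + 1) = j + 1 := by
          simp [pvBackA, List.getElem?_eq_getElem hj, hp]
        rw [hstep]
        simp

theorem pvRunLe (cs : List Char) (i : Nat) :
    ((cs.take i).reverse.takeWhile pvIdentChar).length ≤ i := by
  calc ((cs.take i).reverse.takeWhile pvIdentChar).length
      ≤ (cs.take i).reverse.length := (List.takeWhile_sublist _).length_le
    _ ≤ i := by simp

def pvKeyOf (cs : List Char) (ms : List (Nat × Nat)) : List Char :=
  match ms.getLast? with
  | none => []
  | some (ks, c) => (cs.drop ks).take (c + 1 - ks)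

def pvArgOf (ms : List (Nat × Nat)) : Int :=
  match ms.getLast? with
  | none => -1
  | some (_, c) => (c : Int) + 1

def pvPairsOf (cs : List Char) (ms : List (Nat × Nat)) : List (String × String) :=
  match ms.getLast? with
  | none => []
  | some (ks, _) => pvAsmE cs ks ms.dropLast

theorem pvMain (cs : List Char) (n : Nat) (hn : n ≤ cs.length) :
    (List.range n).foldl (pvStepA cs) ⟨0, [], -1, []⟩ =
      ⟨((List.range n).foldl (pvStepB cs) (0, [])).1,
       pvKeyOf cs ((List.range n).foldl (pvStepB cs) (0, [])).2,
       pvArgOf ((List.range n).foldl (pvStepB cs) (0, [])).2,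
       pvPairsOf cs ((List.range n).foldl (pvStepB cs) (0, [])).2⟩ ∧
    ∀ p ∈ ((List.range n).foldl (pvStepB cs) (0, [])).2, p.1 < p.2 ∧ p.2 < n := by
  induction n with
  | zero => simp [pvKeyOf, pvArgOf, pvPairsOf]
  | succ n ih =>
      obtain ⟨ihA, ihB⟩ := ih (Nat.le_of_succ_le hn)
      set b := (List.range n).foldl (pvStepB cs) (0, []) with hb
      rw [List.range_succ, List.foldl_append, List.foldl_append, ihA]
      simp only [List.foldl_cons, List.foldl_nil]
      have hn' : n < cs.length := hn
      have hget : cs.getD n ' ' = cs[n] := by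
        simp [List.getD, List.getElem?_eq_getElem hn']
      have hkeep : ∀ p ∈ b.2, p.1 < p.2 ∧ p.2 < n + 1 :=
        fun p hp => ⟨(ihB p hp).1, Nat.lt_succ_of_lt (ihB p hp).2⟩
      by_cases h1 : cs[n] = '[' ∨ cs[n] = '('
      · have hA : pvStepA cs ⟨b.1, pvKeyOf cs b.2, pvArgOf b.2, pvPairsOf cs b.2⟩ n =
            ⟨b.1 + 1, pvKeyOf cs b.2, pvArgOf b.2, pvPairsOf cs b.2⟩ := by
          simp only [pvStepA, hget]; rw [if_pos h1]
        have hBst : pvStepB cs b n = (b.1 + 1, b.2) := by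
          simp only [pvStepB, hget]; rw [if_pos h1]
        rw [hA, hBst]
        exact ⟨rfl, hkeep⟩
      · by_cases h2 : cs[n] = ']' ∨ cs[n] = ')'
        · have hA : pvStepA cs ⟨b.1, pvKeyOf cs b.2, pvArgOf b.2, pvPairsOf cs b.2⟩ n =
              ⟨b.1 - 1, pvKeyOf cs b.2, pvArgOf b.2, pvPairsOf cs b.2⟩ := by
            simp only [pvStepA, hget]; rw [if_neg h1, if_pos h2]
          have hBst : pvStepB cs b n = (b.1 - 1, b.2) := by
            simp only [pvStepB, hget]; rw [if_neg h1, if_pos h2]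
          rw [hA, hBst]
          exact ⟨rfl, hkeep⟩
        · by_cases h3 : cs[n] = ':' ∧ b.1 = 0
          · -- colon at depth 0
            have hrun := pvBackA_eq cs n (Nat.le_of_lt hn')
            set run := ((cs.take n).reverse.takeWhile pvIdentChar).length with hrundef
            have hrunle : run ≤ n := pvRunLe cs n
            by_cases h4 : 0 < run ∧ PySem.Chars.isalpha (cs.getD (n - run) ' ') = true
            · -- a marker is recorded
              have hcondA : pvBackA cs n < n ∧
                  PySem.Chars.isalpha (cs.getD (pvBackA cs n) ' ') = true := by
                rw [hrun]; exact ⟨by omega, h4.2⟩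
              have hBst : pvStepB cs b n = (b.1, b.2 ++ [(n - run, n)]) := by
                simp only [pvStepB, hget]
                rw [if_neg h1, if_neg h2, if_pos h3]
                simp only [← hrundef]
                rw [if_pos h4]
              have hA : pvStepA cs ⟨b.1, pvKeyOf cs b.2, pvArgOf b.2, pvPairsOf cs b.2⟩ n =
                  ⟨b.1,
                   PySem.List.slice cs (some ((pvBackA cs n : Nat) : Int)) (some ((n : Int) + 1)),
                   (n : Int) + 1,
                   if pvKeyOf cs b.2 ≠ [] ∧ pvArgOf b.2 ≥ 0 then
                     pvPairsOf cs b.2 ++ [(String.ofList (pvKeyOf cs b.2),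
                       String.ofList (PySem.Chars.strip
                         (PySem.List.slice cs (some (pvArgOf b.2)) (some ((pvBackA cs n : Nat) : Int)))))]
                   else pvPairsOf cs b.2⟩ := by
                simp only [pvStepA, hget]
                rw [if_neg h1, if_neg h2, if_pos (show cs[n] = ':' ∧
                  (⟨b.1, pvKeyOf cs b.2, pvArgOf b.2, pvPairsOf cs b.2⟩ : StA).depth = 0 from h3),
                  if_pos hcondA]
              rw [hA, hBst]
              constructor
              · rcases List.eq_nil_or_concat b.2 with hnil | ⟨ms0, ⟨k0, c0⟩, hms⟩
                · rw [hnil]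
                  simp only [pvKeyOf, pvArgOf, pvPairsOf, List.getLast?_nil, List.nil_append,
                    List.getLast?_concat, List.dropLast_concat, List.getLast?_singleton]
                  rw [if_neg (by simp)]
                  have hslicek : PySem.List.slice cs (some ((pvBackA cs n : Nat) : Int))
                      (some ((n : Int) + 1)) = (cs.drop (pvBackA cs n)).take (n + 1 - pvBackA cs n) := by
                    have hcast : ((n : Int) + 1) = ((n + 1 : Nat) : Int) := by push_cast; ring
                    rw [hcast, PySem.List.slice_natCast]
                  rw [hslicek, hrun]
                  simp [pvAsmE]
                · have hbnd := ihB (k0, c0) (by rw [hms]; simp)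
                  have hkey : pvKeyOf cs b.2 = (cs.drop k0).take (c0 + 1 - k0) := by
                    rw [hms]; simp [pvKeyOf]
                  have harg : pvArgOf b.2 = (c0 : Int) + 1 := by
                    rw [hms]; simp [pvArgOf]
                  have hkeyne : pvKeyOf cs b.2 ≠ [] := by
                    rw [hkey]
                    have hdropne : cs.drop k0 ≠ [] := by
                      intro hc
                      have hld := List.length_drop (l := cs) (i := k0)
                      rw [hc] at hld
                      simp only [List.length_nil] at hld
                      omega
                    simp only [ne_eq, List.take_eq_nil_iff, not_or, hdropne, or_false]
                    omega
                  have hslice : PySem.List.slice cs (some ((c0 : Int) + 1))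
                      (some ((n - run : Nat) : Int)) =
                      (cs.drop (c0 + 1)).take (n - run - (c0 + 1)) := by
                    have hcast : ((c0 : Int) + 1) = ((c0 + 1 : Nat) : Int) := by push_cast; ring
                    rw [hcast, PySem.List.slice_natCast]
                  have hslicek : PySem.List.slice cs (some ((n - run : Nat) : Int))
                      (some ((n : Int) + 1)) = (cs.drop (n - run)).take (n + 1 - (n - run)) := by
                    have hcast : ((n : Int) + 1) = ((n + 1 : Nat) : Int) := by push_cast; ring
                    rw [hcast, PySem.List.slice_natCast]
                  have hpairs : pvPairsOf cs b.2 = pvAsmE cs k0 ms0 := by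
                    rw [hms]; simp [pvPairsOf]
                  have hkey' : pvKeyOf cs ((b.1, b.2 ++ [(n - run, n)]) :
                        Int × List (Nat × Nat)).2 =
                      (cs.drop (n - run)).take (n + 1 - (n - run)) := by
                    simp [pvKeyOf]
                  have harg' : pvArgOf ((b.1, b.2 ++ [(n - run, n)]) :
                        Int × List (Nat × Nat)).2 = (n : Int) + 1 := by
                    simp [pvArgOf]
                  have hpairs' : pvPairsOf cs ((b.1, b.2 ++ [(n - run, n)]) :
                        Int × List (Nat × Nat)).2 =
                      pvAsmE cs (n - run) b.2 := by
                    simp [pvPairsOf]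
                  have hsnoc : pvAsmE cs (n - run) b.2 =
                      pvAsmE cs k0 ms0 ++ [(String.ofList ((cs.drop k0).take (c0 + 1 - k0)),
                        String.ofList (PySem.Chars.strip
                          ((cs.drop (c0 + 1)).take (n - run - (c0 + 1)))))] := by
                    rw [hms, List.concat_eq_append, pvAsmE_snoc]
                  have hcond : pvKeyOf cs b.2 ≠ [] ∧ pvArgOf b.2 ≥ 0 :=
                    ⟨hkeyne, by rw [harg]; positivity⟩
                  rw [if_pos hcond, hrun, harg, hkey, hpairs, hslice, hslicek,
                    hkey', harg', hpairs', hsnoc]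
              · intro p hp
                simp only [hBst, List.mem_append, List.mem_singleton] at hp
                rcases hp with hp | hp
                · exact hkeep p hp
                · rw [hp]
                  exact ⟨by omega, by omega⟩
            · -- colon but no valid keyword before it: both states unchanged
              have hcondA : ¬ (pvBackA cs n < n ∧
                  PySem.Chars.isalpha (cs.getD (pvBackA cs n) ' ') = true) := by
                rw [hrun]
                intro hcc
                exact h4 ⟨by omega, hcc.2⟩
              have hBst : pvStepB cs b n = b := by
                simp only [pvStepB, hget]
                rw [if_neg h1, if_neg h2, if_pos h3]
                simp only [← hrundef]
                rw [if_neg h4]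
              have hA : pvStepA cs ⟨b.1, pvKeyOf cs b.2, pvArgOf b.2, pvPairsOf cs b.2⟩ n =
                  ⟨b.1, pvKeyOf cs b.2, pvArgOf b.2, pvPairsOf cs b.2⟩ := by
                simp only [pvStepA, hget]
                rw [if_neg h1, if_neg h2, if_pos (show cs[n] = ':' ∧
                  (⟨b.1, pvKeyOf cs b.2, pvArgOf b.2, pvPairsOf cs b.2⟩ : StA).depth = 0 from h3),
                  if_neg hcondA]
              rw [hA, hBst]
              exact ⟨rfl, hkeep⟩
          · -- any other character: both states unchanged
            have hBst : pvStepB cs b n = b := by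
              simp only [pvStepB, hget]
              rw [if_neg h1, if_neg h2, if_neg h3]
            have hA : pvStepA cs ⟨b.1, pvKeyOf cs b.2, pvArgOf b.2, pvPairsOf cs b.2⟩ n =
                ⟨b.1, pvKeyOf cs b.2, pvArgOf b.2, pvPairsOf cs b.2⟩ := by
              simp only [pvStepA, hget]
              rw [if_neg h1, if_neg h2, if_neg (show ¬ (cs[n] = ':' ∧
                (⟨b.1, pvKeyOf cs b.2, pvArgOf b.2, pvPairsOf cs b.2⟩ : StA).depth = 0) from h3)]
            rw [hA, hBst]
            exact ⟨rfl, hkeep⟩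

-- ===== VERDICT (by name: the statement is the Claim_ definition above) =====
theorem split_keyword_pairs_py_spec : Claim_equal_split_keyword_pairs_py := by
  intro kw_str _
  unfold Spec_split_keyword_pairs_py
  simp only [split_keyword_pairs_py, split_keyword_pairs_py_alt]
  set cs := kw_str.toList with hcs
  obtain ⟨hA, hB⟩ := pvMain cs cs.length (le_refl _)
  rw [hA]
  rcases List.eq_nil_or_concat ((List.range cs.length).foldl (pvStepB cs) (0, [])).2
    with hnil | ⟨ms0, ⟨k0, c0⟩, hms⟩
  · rw [hnil]
    simp [pvKeyOf, pvArgOf, pvPairsOf, pvAssemble]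
  · have hbnd := hB (k0, c0) (by rw [hms]; simp)
    rw [hms]
    simp only [pvKeyOf, pvArgOf, pvPairsOf, List.concat_eq_append, List.getLast?_concat,
      List.getLast?_append_cons, List.getLast?_singleton, List.dropLast_concat]
    rw [pvAssemble_eq_asmE]
    have hkeyne : (cs.drop k0).take (c0 + 1 - k0) ≠ [] := by
      have hdropne : cs.drop k0 ≠ [] := by
        intro hc
        have hld := List.length_drop (l := cs) (i := k0)
        rw [hc] at hld
        simp only [List.length_nil] at hld
        omega
      simp only [ne_eq, List.take_eq_nil_iff, not_or, hdropne, or_false]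
      omega
    rw [if_pos ⟨hkeyne, by positivity⟩]
    have hslice : PySem.List.slice cs (some ((c0 : Int) + 1)) none = cs.drop (c0 + 1) := by
      have hcast : ((c0 : Int) + 1) = ((c0 + 1 : Nat) : Int) := by push_cast; ring
      rw [hcast, PySem.List.slice_from_natCast]
    have htake : (cs.drop (c0 + 1)).take (cs.length - (c0 + 1)) = cs.drop (c0 + 1) := by
      apply List.take_of_length_le
      simp
    rw [hslice, pvAsmE_snoc, htake]
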